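-- pv_equiv track=rewrite | github.com/Nickless-cmd/jarvis-v2 | scripts/capability_audit.py | compute_reachability
-- ===== SOURCE A (Python) =====
-- from collections import Counter, defaultdict, deque
-- from typing import Iterable, Mapping
--
-- def compute_reachability(
--     graph: Mapping[str, set[str]],
--     entry_modules: Iterable[str],
-- ) -> tuple[set[str], dict[str, set[str]]]:
--     reachable: set[str] = set()
--     parents: dict[str, set[str]] = defaultdict(set)
--     queue = deque(entry_modules)
--
--     while queue:
--         current = queue.popleft()
--         if current in reachable:
--             continue
--         reachable.add(current)
--         for dependency in graph.get(current, set()):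
--             parents[dependency].add(current)
--             if dependency not in reachable:
--                 queue.append(dependency)
--
--     return reachable, parents
-- ===== SOURCE B (Python) =====
-- from collections import defaultdict
--
--
-- def compute_reachability(graph, entry_modules):
--     # Level-synchronous BFS: process the whole frontier at once, collecting
--     # the next frontier, instead of popping one node at a time from a deque.
--     reachable = set()
--     parents = defaultdict(set)
--     frontier = list(entry_modules)
--     while frontier:
--         nxt = []
--         for current in frontier:
--             if current in reachable:
--                 continue
--             reachable.add(current)
--             deps = graph.get(current, set())
--             for dep in deps:
--                 parents[dep].add(current)
--             nxt.extend(dep for dep in deps if dep not in reachable)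
--         frontier = nxt
--     return reachable, parents
-- ===== Notes on version B (the rewrite author's own statement) =====
-- stated objective: alternative
-- what changed: Replaces the deque-based node-at-a-time BFS with a level-synchronous BFS: an outer loop over whole frontiers and an inner loop that processes each frontier node and accumulates the next frontier list, with the parent-edge updates hoisted into their own inner loop; no deque is used.
import Mathlib
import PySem

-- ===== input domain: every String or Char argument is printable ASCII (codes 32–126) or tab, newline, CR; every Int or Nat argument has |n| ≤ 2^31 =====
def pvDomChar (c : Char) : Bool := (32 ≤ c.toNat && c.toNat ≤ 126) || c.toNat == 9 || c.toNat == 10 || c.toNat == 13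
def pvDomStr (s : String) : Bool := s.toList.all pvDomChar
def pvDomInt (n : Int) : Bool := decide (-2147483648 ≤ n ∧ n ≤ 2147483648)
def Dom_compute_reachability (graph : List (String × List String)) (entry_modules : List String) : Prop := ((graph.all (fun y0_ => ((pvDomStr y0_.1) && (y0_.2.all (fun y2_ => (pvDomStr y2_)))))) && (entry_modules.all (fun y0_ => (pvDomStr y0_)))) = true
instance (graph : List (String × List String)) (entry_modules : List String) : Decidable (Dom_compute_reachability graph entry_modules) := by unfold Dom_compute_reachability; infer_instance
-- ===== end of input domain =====

-- B changes the traversal decomposition only (level-synchronous BFS instead of a deque-based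
-- node-at-a-time BFS); same outputs, same O(V+E) cost.

-- ===== PORT A =====
-- shared with port B: all dependency-list entries of the graph (used only by termination measures)
def crVals (graph : List (String × List String)) : List String := (graph.map Prod.snd).flatten

-- shared with port B: graph.get(current, set()) — first-match association-list lookup, default empty
def crGet (graph : List (String × List String)) (c : String) : List String :=
  ((graph.find? (fun kv => kv.1 == c)).map Prod.snd).getD []

lemma crGet_subset (graph : List (String × List String)) (c : String) :
    ∀ x ∈ crGet graph c, x ∈ crVals graph := by
  intro x hx
  unfold crGet at hx
  unfold crVals
  cases h : graph.find? (fun kv => kv.1 == c) with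
  | none => simp [h] at hx
  | some kv =>
    simp [h] at hx
    have hmem := List.mem_of_find?_eq_some h
    simp only [List.mem_flatten]
    exact ⟨kv.2, List.mem_map_of_mem hmem, hx⟩

-- termination measure: how many candidate nodes (queue ∪ all dependency values) are not yet reachable
def crMu (graph : List (String × List String)) (r : List String) (q : List String) : Nat :=
  ((q ++ crVals graph).toFinset \ r.toFinset).card

lemma crMu_cons_mem (graph : List (String × List String)) (r : List String) (c : String)
    (q : List String) (hc : c ∈ r) : crMu graph r (c :: q) = crMu graph r q := by
  unfold crMu
  congr 1
  ext x
  simp only [Finset.mem_sdiff, List.mem_toFinset, List.mem_append, List.mem_cons]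
  constructor
  · rintro ⟨hx | hx, hr⟩
    · rcases hx with rfl | hx
      · exact absurd hc hr
      · exact ⟨Or.inl hx, hr⟩
    · exact ⟨Or.inr hx, hr⟩
  · rintro ⟨hx | hx, hr⟩
    · exact ⟨Or.inl (Or.inr hx), hr⟩
    · exact ⟨Or.inr hx, hr⟩

lemma crMu_all_mem (graph : List (String × List String)) (r : List String)
    (f : List String) (h : ∀ c ∈ f, c ∈ r) : crMu graph r f = crMu graph r [] := by
  unfold crMu
  congr 1
  ext x
  simp only [Finset.mem_sdiff, List.mem_toFinset, List.mem_append, List.nil_append]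
  constructor
  · rintro ⟨hx | hx, hr⟩
    · exact absurd (h x hx) hr
    · exact ⟨hx, hr⟩
  · rintro ⟨hx, hr⟩
    exact ⟨Or.inr hx, hr⟩

lemma crMu_lt (graph : List (String × List String)) (r r2 q2 f : List String) (c : String)
    (hsub : ∀ x ∈ q2, x ∈ f ∨ x ∈ crVals graph) (hr : ∀ x ∈ r, x ∈ r2)
    (hcf : c ∈ f) (hcr : c ∉ r) (hcr2 : c ∈ r2) : crMu graph r2 q2 < crMu graph r f := by
  unfold crMu
  apply Finset.card_lt_card
  rw [Finset.ssubset_iff_of_subset]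
  · exact ⟨c, by
      simp only [Finset.mem_sdiff, List.mem_toFinset, List.mem_append]
      exact ⟨⟨Or.inl hcf, hcr⟩, fun h => absurd hcr2 (by simpa using h.2)⟩⟩
  · intro x hx
    simp only [Finset.mem_sdiff, List.mem_toFinset, List.mem_append] at hx ⊢
    obtain ⟨hx1, hx2⟩ := hx
    refine ⟨?_, fun hxr => hx2 (hr x hxr)⟩
    rcases hx1 with hx1 | hx1
    · exact hsub x hx1
    · exact Or.inr hx1

-- the inner 'for dependency in graph.get(current)' loop of A, carrying (parents, queue),
-- splits into a parents-fold and a queue suffix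
lemma crPairFold (deps : List String) (r' : PySem.Set String)
    (p : PySem.Dict String (PySem.Set String)) (q : List String) (c : String) :
    deps.foldl (fun pq d =>
        (PySem.Dict.modify pq.1 d PySem.Set.empty (fun s => PySem.Set.add s c),
         if r'.contains d then pq.2 else pq.2 ++ [d])) (p, q)
      = (deps.foldl (fun p d => PySem.Dict.modify p d PySem.Set.empty (fun s => PySem.Set.add s c)) p,
         q ++ deps.filter (fun d => !r'.contains d)) := by
  induction deps generalizing p q with
  | nil => simp
  | cons d ds ih =>
    simp only [List.foldl_cons, List.filter_cons]
    cases r'.contains d <;> simp at ih ⊢ <;> simp [ih, List.append_assoc]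

-- the BFS loop of A: pop one node from the queue at a time
def crLoopA (graph : List (String × List String)) (r : PySem.Set String)
    (p : PySem.Dict String (PySem.Set String)) (q : List String) :
    PySem.Set String × PySem.Dict String (PySem.Set String) :=
  match q with
  | [] => (r, p)
  | c :: q' =>
    if r.contains c then crLoopA graph r p q'
    else
      let r' := PySem.Set.add r c
      let pq := (crGet graph c).foldl (fun pq d =>
          (PySem.Dict.modify pq.1 d PySem.Set.empty (fun s => PySem.Set.add s c),
           if r'.contains d then pq.2 else pq.2 ++ [d])) (p, q')
      crLoopA graph r' pq.1 pq.2
termination_by (crMu graph r q, q.length)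
decreasing_by
  · rename_i hc
    have hcm : c ∈ r := (PySem.Set.contains_iff r c).mp hc
    rw [crMu_cons_mem graph r c q' hcm]
    exact Prod.Lex.right _ (by simp)
  · rename_i hc
    apply Prod.Lex.left
    have hcr : c ∉ r := fun h => hc ((PySem.Set.contains_iff r c).mpr h)
    simp only [dite_eq_ite]
    rw [crPairFold]
    apply crMu_lt graph r (PySem.Set.add r c) _ (c :: q') c
    · intro x hx
      simp only [List.mem_append, List.mem_filter] at hx
      rcases hx with hx | hx
      · exact Or.inl (List.mem_cons_of_mem _ hx)
      · exact Or.inr (crGet_subset graph c x hx.1)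
    · intro x hx; exact (PySem.Set.mem_add r c x).mpr (Or.inl hx)
    · exact List.mem_cons_self
    · exact hcr
    · exact (PySem.Set.mem_add r c c).mpr (Or.inr rfl)

def compute_reachability (graph : List (String × List String)) (entry_modules : List String) :
    List String × (List (String × List String)) :=
  let rp := crLoopA graph PySem.Set.empty PySem.Dict.empty entry_modules
  (rp.1, rp.2.items)

-- ===== PORT B =====
-- processing of one frontier node: mark reachable, record parent edges, extend the next frontier
def crStepB (graph : List (String × List String))
    (st : PySem.Set String × PySem.Dict String (PySem.Set String) × List String) (c : String) :
    PySem.Set String × PySem.Dict String (PySem.Set String) × List String :=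
  if st.1.contains c then st
  else
    let r' := PySem.Set.add st.1 c
    let deps := crGet graph c
    (r',
     deps.foldl (fun p d => PySem.Dict.modify p d PySem.Set.empty (fun s => PySem.Set.add s c)) st.2.1,
     st.2.2 ++ deps.filter (fun d => !r'.contains d))

lemma crStepB_id (graph : List (String × List String))
    (st : PySem.Set String × PySem.Dict String (PySem.Set String) × List String) (c : String)
    (h : st.1.contains c) : crStepB graph st c = st := by
  unfold crStepB; rw [if_pos h]

-- a whole level leaves the state unchanged when every frontier node is already reachable
lemma crFoldB_id (graph : List (String × List String)) (f : List String)
    (st : PySem.Set String × PySem.Dict String (PySem.Set String) × List String)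
    (h : ∀ c ∈ f, st.1.contains c) : f.foldl (crStepB graph) st = st := by
  induction f with
  | nil => rfl
  | cons c f' ih =>
    simp only [List.foldl_cons, crStepB_id graph st c (h c List.mem_cons_self)]
    exact ih (fun d hd => h d (List.mem_cons_of_mem _ hd))

lemma crFoldB_reach_mono (graph : List (String × List String)) (f : List String)
    (st : PySem.Set String × PySem.Dict String (PySem.Set String) × List String)
    (x : String) (hx : x ∈ st.1) : x ∈ (f.foldl (crStepB graph) st).1 := by
  induction f generalizing st with
  | nil => exact hx
  | cons c f' ih =>
    simp only [List.foldl_cons]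
    apply ih
    unfold crStepB
    split
    · exact hx
    · exact (PySem.Set.mem_add st.1 c x).mpr (Or.inl hx)

lemma crFoldB_next_sub (graph : List (String × List String)) (f : List String)
    (st : PySem.Set String × PySem.Dict String (PySem.Set String) × List String)
    (x : String) (hx : x ∈ (f.foldl (crStepB graph) st).2.2) :
    x ∈ st.2.2 ∨ x ∈ crVals graph := by
  induction f generalizing st with
  | nil => exact Or.inl hx
  | cons c f' ih =>
    simp only [List.foldl_cons] at hx
    rcases ih _ hx with h | h
    · unfold crStepB at h
      split at h
      · exact Or.inl h
      · simp only [List.mem_append, List.mem_filter] at h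
        rcases h with h | h
        · exact Or.inl h
        · exact Or.inr (crGet_subset graph c x h.1)
    · exact Or.inr h

lemma crFoldB_visits (graph : List (String × List String)) (f : List String)
    (st : PySem.Set String × PySem.Dict String (PySem.Set String) × List String)
    (c : String) (hcf : c ∈ f) : c ∈ (f.foldl (crStepB graph) st).1 := by
  induction f generalizing st with
  | nil => cases hcf
  | cons d f' ih =>
    simp only [List.foldl_cons]
    rcases List.mem_cons.mp hcf with rfl | hcf'
    · apply crFoldB_reach_mono
      unfold crStepB
      split
      · next h => exact (PySem.Set.contains_iff _ _).mp h
      · exact (PySem.Set.mem_add st.1 c c).mpr (Or.inr rfl)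
    · exact ih _ hcf'

-- one whole frontier level of B: the body of B's inner 'for current in frontier' loop
def crLevelB (graph : List (String × List String)) (r : PySem.Set String)
    (p : PySem.Dict String (PySem.Set String)) (f : List String) :
    PySem.Set String × PySem.Dict String (PySem.Set String) × List String :=
  f.foldl (crStepB graph) (r, p, [])

-- the BFS loop of B: process the whole frontier at once, then recurse on the next frontier
def crLoopB (graph : List (String × List String)) (r : PySem.Set String)
    (p : PySem.Dict String (PySem.Set String)) (f : List String) :
    PySem.Set String × PySem.Dict String (PySem.Set String) :=
  if f.isEmpty then (r, p)
  else
    let st := crLevelB graph r p f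
    crLoopB graph st.1 st.2.1 st.2.2
termination_by (crMu graph r f, if f = [] then 0 else 1)
decreasing_by
  unfold crLevelB
  rename_i hfne
  have hfe : f ≠ [] := fun e => by simp [e] at hfne
  by_cases hall : ∀ c ∈ f, PySem.Set.contains r c
  · rw [crFoldB_id graph f (r, p, []) hall]
    rw [crMu_all_mem graph r f (fun c hc => (PySem.Set.contains_iff r c).mp (hall c hc))]
    exact Prod.Lex.right _ (by simp [hfe])
  · apply Prod.Lex.left
    rw [not_forall] at hall
    obtain ⟨c, hc2⟩ := hall
    rw [Classical.not_imp] at hc2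
    obtain ⟨hcf, hcr⟩ := hc2
    apply crMu_lt graph r _ _ f c
    · intro x hx
      rcases crFoldB_next_sub graph f (r, p, []) x hx with h | h
      · cases h
      · exact Or.inr h
    · intro x hx; exact crFoldB_reach_mono graph f (r, p, []) x hx
    · exact hcf
    · exact fun h => hcr ((PySem.Set.contains_iff r c).mpr h)
    · exact crFoldB_visits graph f (r, p, []) c hcf

def compute_reachability_alt (graph : List (String × List String)) (entry_modules : List String) :
    List String × (List (String × List String)) :=
  let rp := crLoopB graph PySem.Set.empty PySem.Dict.empty entry_modules
  (rp.1, rp.2.items)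

-- ===== PRECONDITION & SPEC =====
def Spec_compute_reachability (graph : List (String × List String)) (entry_modules : List String) (out : List String × (List (String × List String))) : Prop := out = compute_reachability_alt graph entry_modules
instance (graph : List (String × List String)) (entry_modules : List String) (out : List String × (List (String × List String))) : Decidable (Spec_compute_reachability graph entry_modules out) := by unfold Spec_compute_reachability; infer_instance

-- ===== CLAIM (what is proved, stated in full; the proofs are below) =====
def Claim_equal_compute_reachability : Prop := ∀ (graph : List (String × List String)) (entry_modules : List String), Dom_compute_reachability graph entry_modules → Spec_compute_reachability graph entry_modules (compute_reachability graph entry_modules)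

-- ===== LEMMAS AND PROOFS =====

-- shifting the next-frontier accumulator out of a level fold
lemma crFoldB_acc (graph : List (String × List String)) (f : List String)
    (r : PySem.Set String) (p : PySem.Dict String (PySem.Set String)) (acc : List String) :
    f.foldl (crStepB graph) (r, p, acc)
      = ((f.foldl (crStepB graph) (r, p, [])).1,
         (f.foldl (crStepB graph) (r, p, [])).2.1,
         acc ++ (f.foldl (crStepB graph) (r, p, [])).2.2) := by
  induction f generalizing r p acc with
  | nil => simp
  | cons c f' ih =>
    simp only [List.foldl_cons]
    by_cases h : PySem.Set.contains r c
    · rw [crStepB_id graph (r, p, acc) c h, crStepB_id graph (r, p, []) c h, ih]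
    · have hstep : ∀ acc' : List String, crStepB graph (r, p, acc') c
          = (PySem.Set.add r c,
             (crGet graph c).foldl
               (fun p d => PySem.Dict.modify p d PySem.Set.empty (fun s => PySem.Set.add s c)) p,
             acc' ++ (crGet graph c).filter (fun d => !(PySem.Set.add r c).contains d)) := by
        intro acc'; unfold crStepB; rw [if_neg h]
      rw [hstep acc, hstep [], List.nil_append,
          ih _ _ ((crGet graph c).filter (fun d => !(PySem.Set.add r c).contains d)),
          ih _ _ (acc ++ (crGet graph c).filter (fun d => !(PySem.Set.add r c).contains d))]
      simp [List.append_assoc]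

-- one queue level of A equals one frontier step of B
lemma crBridge (graph : List (String × List String)) (f : List String) :
    ∀ (g : List String) (r : PySem.Set String) (p : PySem.Dict String (PySem.Set String)),
    crLoopA graph r p (f ++ g)
      = crLoopA graph (f.foldl (crStepB graph) (r, p, [])).1
          (f.foldl (crStepB graph) (r, p, [])).2.1
          (g ++ (f.foldl (crStepB graph) (r, p, [])).2.2) := by
  induction f with
  | nil => intro g r p; simp
  | cons c f' ih =>
    intro g r p
    rw [List.cons_append, List.foldl_cons]
    by_cases h : PySem.Set.contains r c
    · rw [crLoopA, if_pos h, crStepB_id graph (r, p, []) c h]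
      exact ih g r p
    · rw [crLoopA, if_neg h]
      show crLoopA graph (PySem.Set.add r c) _ _ = _
      rw [crPairFold]
      have hstep : crStepB graph (r, p, []) c
          = (PySem.Set.add r c,
             (crGet graph c).foldl
               (fun p d => PySem.Dict.modify p d PySem.Set.empty (fun s => PySem.Set.add s c)) p,
             (crGet graph c).filter (fun d => !(PySem.Set.add r c).contains d)) := by
        unfold crStepB; rw [if_neg h]; simp
      rw [hstep]
      rw [crFoldB_acc graph f' _ _ (List.filter _ _)]
      rw [show f' ++ g ++ (crGet graph c).filter (fun d => !(PySem.Set.add r c).contains d)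
            = f' ++ (g ++ (crGet graph c).filter (fun d => !(PySem.Set.add r c).contains d))
          from List.append_assoc ..]
      rw [ih]
      simp [List.append_assoc]

lemma crLoopA_eq_crLoopB (graph : List (String × List String)) (r : PySem.Set String)
    (p : PySem.Dict String (PySem.Set String)) (f : List String) :
    crLoopA graph r p f = crLoopB graph r p f := by
  induction r, p, f using crLoopB.induct graph with
  | case1 r p f hf =>
    have hf' : f = [] := List.isEmpty_iff.mp hf
    subst hf'
    rw [crLoopA, crLoopB]
    simp
  | case2 r p f hne st ih =>
    rw [crLoopB, if_neg hne]
    have hb := crBridge graph f [] r p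
    rw [List.append_nil, List.nil_append] at hb
    show crLoopA graph r p f = crLoopB graph st.1 st.2.1 st.2.2
    rw [← ih]
    have hst : st = List.foldl (crStepB graph) (r, p, []) f := rfl
    rw [hst]
    exact hb

-- ===== VERDICT (by name: the statement is the Claim_ definition above) =====
theorem compute_reachability_spec : Claim_equal_compute_reachability := by
  intro graph entry_modules _
  unfold Spec_compute_reachability compute_reachability compute_reachability_alt
  rw [crLoopA_eq_crLoopB]
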